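-- pv_equiv track=rewrite | github.com/2226171237/Algorithmpractice | 机试/美团/test3.py | solve
-- ===== SOURCE A (Python) =====
-- def solve(a):
--     n=len(a)
--     result=0
--
--     prev=[0 for _ in range(n)]
--     for i in range(1,n):
--         prev[i]=prev[i-1]^i
--
--     for i in range(1,n+1):
--         result^=a[i-1]
--         c=n//i
--         t = n % i
--         if c%2==1:
--             result^=prev[i-1]
--         result^=prev[t]
--     return result
-- ===== SOURCE B (Python) =====
-- def solve(a):
--     n = len(a)
--     def xor_upto(k):
--         return [k, 1, k + 1, 0][k % 4]
--     result = 0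
--     for x in a:
--         result ^= x
--     for i in range(1, n + 1):
--         c = n // i
--         t = n % i
--         if c % 2 == 1:
--             result ^= xor_upto(i - 1)
--         result ^= xor_upto(t)
--     return result
-- ===== Notes on version B (the rewrite author's own statement) =====
-- stated objective: simpler
-- what changed: Replaces the precomputed prefix-xor table prev with the closed form xor_upto(k) = [k,1,k+1,0][k%4] and xors the whole array up front, eliminating the auxiliary O(n) array
import Mathlib
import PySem

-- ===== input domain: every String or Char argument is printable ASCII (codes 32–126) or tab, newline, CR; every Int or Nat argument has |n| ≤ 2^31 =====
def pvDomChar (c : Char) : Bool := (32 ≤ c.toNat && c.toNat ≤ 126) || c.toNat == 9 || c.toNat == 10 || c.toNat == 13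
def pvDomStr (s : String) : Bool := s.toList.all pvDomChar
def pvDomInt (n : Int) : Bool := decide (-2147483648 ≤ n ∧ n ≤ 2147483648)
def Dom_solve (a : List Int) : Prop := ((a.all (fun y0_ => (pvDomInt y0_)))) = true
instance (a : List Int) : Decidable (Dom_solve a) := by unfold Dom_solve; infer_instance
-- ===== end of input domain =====

-- B replaces A's precomputed prefix-xor table by the closed form 1^2^…^k = [k,1,k+1,0][k%4] and
-- xors the array elements up front (objective: simpler — no auxiliary array).

-- ===== PORT A =====
-- helper: the loop that fills prev ('prev[i] = prev[i-1]^i' for i in range(1,n))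
def buildPrev (n : Nat) : List Int :=
  (List.range' 1 (n - 1)).foldl
    (fun p i => p.set i (PySem.Int.bxor (p.getD (i - 1) 0) (i : Int)))
    (List.replicate n 0)

def solve (a : List Int) : Int :=
  let n := a.length
  let prev := buildPrev n
  (List.range' 1 n).foldl
    (fun (result : Int) (i : Nat) =>
      let result := PySem.Int.bxor result (a.getD (i - 1) 0)
      let c := PySem.Int.floordiv (n : Int) (i : Int)
      let t := PySem.Int.mod (n : Int) (i : Int)
      let result := if PySem.Int.mod c 2 == 1 then PySem.Int.bxor result (prev.getD (i - 1) 0) else result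
      PySem.Int.bxor result (prev.getD t.toNat 0))
    0

-- ===== PORT B =====
-- helper: xor_upto(k) = [k, 1, k+1, 0][k % 4]
def xorUpto (k : Int) : Int := [k, 1, k + 1, 0].getD (PySem.Int.mod k 4).toNat 0

def solve_alt (a : List Int) : Int :=
  let n := a.length
  let result := a.foldl (fun r x => PySem.Int.bxor r x) 0
  (List.range' 1 n).foldl
    (fun (result : Int) (i : Nat) =>
      let c := PySem.Int.floordiv (n : Int) (i : Int)
      let t := PySem.Int.mod (n : Int) (i : Int)
      let result := if PySem.Int.mod c 2 == 1 then PySem.Int.bxor result (xorUpto ((i : Int) - 1)) else result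
      PySem.Int.bxor result (xorUpto t))
    result

-- ===== PRECONDITION & SPEC =====
def Spec_solve (a : List Int) (out : Int) : Prop := out = solve_alt a
instance (a : List Int) (out : Int) : Decidable (Spec_solve a out) := by unfold Spec_solve; infer_instance

-- ===== CLAIM (what is proved, stated in full; the proofs are below) =====
def Claim_equal_solve : Prop := ∀ (a : List Int), Dom_solve a → Spec_solve a (solve a)

-- ===== LEMMAS AND PROOFS =====

-- xor of 1..k at the Nat level
def XN : Nat → Nat
  | 0 => 0
  | k + 1 => XN k ^^^ (k + 1)

-- encoding of Python's infinite two's-complement ints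
def pvEnc (a : Int) : Bool × Nat := if 0 ≤ a then (false, a.toNat) else (true, (-a - 1).toNat)
def pvDec (p : Bool × Nat) : Int := if p.1 then -(p.2 : Int) - 1 else (p.2 : Int)
def pvBX (p q : Bool × Nat) : Bool × Nat := (xor p.1 q.1, p.2 ^^^ q.2)

lemma pvEnc_pvDec (p : Bool × Nat) : pvEnc (pvDec p) = p := by
  obtain ⟨b, m⟩ := p
  cases b <;> simp [pvEnc, pvDec] <;> omega

lemma bxor_eq_dec (a b : Int) : PySem.Int.bxor a b = pvDec (pvBX (pvEnc a) (pvEnc b)) := by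
  simp only [PySem.Int.bxor, pvEnc, pvBX, pvDec]
  split_ifs <;> simp_all

lemma bxor_assoc (a b c : Int) :
    PySem.Int.bxor (PySem.Int.bxor a b) c = PySem.Int.bxor a (PySem.Int.bxor b c) := by
  rw [bxor_eq_dec a b, bxor_eq_dec b c, bxor_eq_dec, bxor_eq_dec, pvEnc_pvDec, pvEnc_pvDec]
  simp [pvBX, Nat.xor_assoc]

lemma zero_bxor (a : Int) : PySem.Int.bxor 0 a = a := by
  rw [PySem.Int.bxor_comm]; exact PySem.Int.bxor_zero a

lemma bxor_if (b : Bool) (r x : Int) :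
    (if b then PySem.Int.bxor r x else r) = PySem.Int.bxor r (if b then x else 0) := by
  cases b <;> simp [PySem.Int.bxor_zero]

-- 2t ^^^ 1 = 2t + 1 at the Nat level
lemma two_mul_xor_one (t : Nat) : 2 * t ^^^ 1 = 2 * t + 1 := by
  apply Nat.eq_of_testBit_eq; intro i
  cases i with
  | zero => simp
  | succ j => simp [Nat.testBit_add_one]

lemma even_xor_succ (k : Nat) (h : k % 2 = 0) : k ^^^ (k + 1) = 1 := by
  obtain ⟨t, rfl⟩ : ∃ t, k = 2 * t := ⟨k / 2, by omega⟩
  rw [show 2 * t + 1 = 2 * t ^^^ 1 from (two_mul_xor_one t).symm,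
      ← Nat.xor_assoc, Nat.xor_self, Nat.zero_xor]

lemma one_xor_even (k : Nat) (h : k % 2 = 0) : 1 ^^^ k = k + 1 := by
  obtain ⟨t, rfl⟩ : ∃ t, k = 2 * t := ⟨k / 2, by omega⟩
  rw [Nat.xor_comm, two_mul_xor_one]

lemma XN_closed (k : Nat) :
    XN k = if k % 4 = 0 then k else if k % 4 = 1 then 1 else if k % 4 = 2 then k + 1 else 0 := by
  induction k with
  | zero => simp [XN]
  | succ k ih =>
    have e : XN (k + 1) = XN k ^^^ (k + 1) := rfl
    rcases (by omega : k % 4 = 0 ∨ k % 4 = 1 ∨ k % 4 = 2 ∨ k % 4 = 3) with h | h | h | h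
    · have h1 : (k + 1) % 4 = 1 := by omega
      simp only [e, ih, h, h1]; norm_num
      exact even_xor_succ k (by omega)
    · have h1 : (k + 1) % 4 = 2 := by omega
      simp only [e, ih, h, h1]; norm_num
      exact one_xor_even (k + 1) (by omega)
    · have h1 : (k + 1) % 4 = 3 := by omega
      simp only [e, ih, h, h1]; norm_num
    · have h1 : (k + 1) % 4 = 0 := by omega
      simp only [e, ih, h, h1]; norm_num

lemma xorUpto_natCast (k : Nat) : xorUpto (k : Int) = (XN k : Int) := by
  unfold xorUpto
  rw [show ((4 : Int)) = ((4 : Nat) : Int) from rfl, PySem.Int.mod_natCast]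
  rw [Int.toNat_natCast, XN_closed]
  rcases (by omega : k % 4 = 0 ∨ k % 4 = 1 ∨ k % 4 = 2 ∨ k % 4 = 3) with h | h | h | h <;>
    simp [h, List.getD]

-- prev-table invariant
lemma build_inv (c : Nat) : ∀ (m : Nat) (p : List Int), 1 ≤ m → m + c = p.length →
    (∀ k, k < m → p.getD k 0 = (XN k : Int)) →
    ∀ k, k < p.length →
    ((List.range' m c).foldl (fun p i => p.set i (PySem.Int.bxor (p.getD (i - 1) 0) (i : Int))) p).getD k 0
      = (XN k : Int) := by
  induction c with
  | zero =>
    intro m p _ hlen h k hk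
    simpa using h k (by omega)
  | succ c ih =>
    intro m p hm hlen h k hk
    rw [List.range'_succ]
    simp only [List.foldl_cons]
    apply ih (m + 1) _ (by omega) (by simpa using by omega)
    · intro j hj
      rcases (by omega : j < m ∨ j = m) with hj' | rfl
      · rw [List.getD_eq_getElem?_getD, List.getElem?_set_ne (by omega), ← List.getD_eq_getElem?_getD]
        exact h j hj'
      · rw [List.getD_eq_getElem?_getD, List.getElem?_set_self (by omega),
          Option.getD_some, h (j - 1) (by omega)]
        have : (j : Int) = ((j - 1 + 1 : Nat) : Int) := by push_cast; omega
        rw [this, PySem.Int.bxor_natCast]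
        norm_cast
        conv_rhs => rw [show j = (j - 1) + 1 by omega]
        rfl
    · simpa using hk

lemma buildPrev_getD (n k : Nat) (hk : k < n) : (buildPrev n).getD k 0 = (XN k : Int) := by
  unfold buildPrev
  apply build_inv (n - 1) 1 _ (by omega) (by simp; omega) _ k (by simp; omega)
  intro j hj
  interval_cases j
  rw [List.getD_eq_getElem?_getD, List.getElem?_replicate_of_lt (by omega)]
  rfl

-- loop-shape lemmas for xor folds
lemma foldl_bxor_start (f : Nat → Int) (l : List Nat) : ∀ (s : Int),
    l.foldl (fun r i => PySem.Int.bxor r (f i)) s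
      = PySem.Int.bxor s (l.foldl (fun r i => PySem.Int.bxor r (f i)) 0) := by
  induction l with
  | nil => intro s; simp [PySem.Int.bxor_zero]
  | cons x l ih =>
    intro s
    simp only [List.foldl_cons]
    rw [ih (PySem.Int.bxor s (f x)), ih (PySem.Int.bxor 0 (f x)), zero_bxor, bxor_assoc]

lemma foldl_bxor_split (f g : Nat → Int) (l : List Nat) :
    l.foldl (fun r i => PySem.Int.bxor r (PySem.Int.bxor (f i) (g i))) 0
      = PySem.Int.bxor (l.foldl (fun r i => PySem.Int.bxor r (f i)) 0)
          (l.foldl (fun r i => PySem.Int.bxor r (g i)) 0) := by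
  induction l with
  | nil => simp
  | cons x l ih =>
    simp only [List.foldl_cons]
    rw [foldl_bxor_start _ l, foldl_bxor_start f l, foldl_bxor_start g l, ih]
    rw [zero_bxor, zero_bxor, zero_bxor]
    rw [bxor_assoc, bxor_assoc]
    congr 1
    rw [← bxor_assoc, ← bxor_assoc, PySem.Int.bxor_comm (g x)]

lemma foldl_bxor_index (a : List Int) : ∀ (m : Nat) (s : Int),
    a.foldl (fun r x => PySem.Int.bxor r x) s
      = (List.range' m a.length).foldl (fun r i => PySem.Int.bxor r (a.getD (i - m) 0)) s := by
  induction a with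
  | nil => intro m s; simp
  | cons x a ih =>
    intro m s
    simp only [List.length_cons, List.range'_succ, List.foldl_cons, Nat.sub_self, List.getD]
    simp only [List.getElem?_cons_zero, Option.getD_some]
    rw [ih (m + 1)]
    apply PySem.List.foldl_congr_mem
    intro acc i hi
    have hi' := List.mem_range'_1.mp hi
    congr 1
    rw [show i - m = (i - (m + 1)) + 1 by omega]
    simp [List.getD]

-- per-iteration payloads
def condAB (n i : Nat) : Bool := PySem.Int.mod (PySem.Int.floordiv (n : Int) (i : Int)) 2 == 1

def G (n i : Nat) : Int :=
  PySem.Int.bxor (if condAB n i then (XN (i - 1) : Int) else 0) (XN (n % i) : Int)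

lemma stepA_eq (a : List Int) (i : Nat) (h1 : 1 ≤ i) (h2 : i ≤ a.length) (r : Int) :
    PySem.Int.bxor
      (if PySem.Int.mod (PySem.Int.floordiv (a.length : Int) (i : Int)) 2 == 1 then
        PySem.Int.bxor (PySem.Int.bxor r (a.getD (i - 1) 0)) ((buildPrev a.length).getD (i - 1) 0)
      else PySem.Int.bxor r (a.getD (i - 1) 0))
      ((buildPrev a.length).getD (PySem.Int.mod (a.length : Int) (i : Int)).toNat 0)
    = PySem.Int.bxor r (PySem.Int.bxor (a.getD (i - 1) 0) (G a.length i)) := by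
  have hmod : PySem.Int.mod (a.length : Int) (i : Int) = ((a.length % i : Nat) : Int) :=
    PySem.Int.mod_natCast _ _
  have htl : a.length % i < a.length := Nat.lt_of_lt_of_le (Nat.mod_lt _ (by omega)) h2
  simp only [hmod, Int.toNat_natCast]
  rw [buildPrev_getD _ _ (by omega), buildPrev_getD _ _ htl, bxor_if]
  rw [bxor_assoc, bxor_assoc]
  rfl

lemma stepB_eq (n i : Nat) (h1 : 1 ≤ i) (r : Int) :
    PySem.Int.bxor
      (if PySem.Int.mod (PySem.Int.floordiv (n : Int) (i : Int)) 2 == 1 then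
        PySem.Int.bxor r (xorUpto ((i : Int) - 1))
      else r)
      (xorUpto (PySem.Int.mod (n : Int) (i : Int)))
    = PySem.Int.bxor r (G n i) := by
  have hmod : PySem.Int.mod (n : Int) (i : Int) = ((n % i : Nat) : Int) := PySem.Int.mod_natCast _ _
  have hi : ((i : Int) - 1) = ((i - 1 : Nat) : Int) := by push_cast [h1]; ring
  simp only [hmod, hi, xorUpto_natCast, bxor_if]
  rw [bxor_assoc]
  rfl

-- ===== VERDICT (by name: the statement is the Claim_ definition above) =====
theorem solve_spec : Claim_equal_solve := by
  intro a _
  unfold Spec_solve solve solve_alt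
  simp only []
  trans (List.foldl (fun (r : Int) (i : Nat) =>
      PySem.Int.bxor r (PySem.Int.bxor (a.getD (i - 1) 0) (G a.length i))) 0 (List.range' 1 a.length))
  · refine PySem.List.foldl_congr_mem _ _ _ _ ?_
    intro r i hi
    have h := List.mem_range'_1.mp hi
    exact stepA_eq a i h.1 (by omega) r
  symm
  trans (List.foldl (fun (r : Int) (i : Nat) => PySem.Int.bxor r (G a.length i))
      (List.foldl (fun (r x : Int) => PySem.Int.bxor r x) 0 a) (List.range' 1 a.length))
  · refine PySem.List.foldl_congr_mem _ _ _ _ ?_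
    intro r i hi
    have h := List.mem_range'_1.mp hi
    exact stepB_eq a.length i h.1 r
  rw [foldl_bxor_split (fun i => a.getD (i - 1) 0) (fun i => G a.length i) (List.range' 1 a.length)]
  rw [foldl_bxor_start (fun i => G a.length i) (List.range' 1 a.length)
      (List.foldl (fun (r x : Int) => PySem.Int.bxor r x) 0 a)]
  congr 1
  exact foldl_bxor_index a 1 0
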